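-- pv_equiv track=rewrite | github.com/Smorareq1/FinalIO | ruta_critica.py | encontrar_rutas_cpm
-- ===== SOURCE A (Python) =====
-- def encontrar_rutas_cpm(datos):
--     """Encuentra todas las rutas posibles en una red CPM."""
--
--     actividades = {}
--     for item in datos:
--         nombre = item[0]
--         predecesores = item[1].split(',') if item[1] != '-' else []
--         duracion = item[2]
--         actividades[nombre] = {
--             'predecesores': predecesores,
--             'duracion': duracion,
--             'sucesores': []
--         }
--
--     for nombre, info in actividades.items():
--         for predecesor in info['predecesores']:
--             if predecesor != '-':
--                 actividades[predecesor]['sucesores'].append(nombre)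
--
--     inicio = [nombre for nombre, info in actividades.items()
--               if not info['predecesores'] or info['predecesores'] == ['-']]
--
--     finales = [nombre for nombre, info in actividades.items()
--                if not info['sucesores']]
--
--     def buscar_rutas(nodo_actual, ruta_actual, duracion_actual):
--         ruta_actual = ruta_actual + [nodo_actual]
--         duracion_actual += actividades[nodo_actual]['duracion']
--
--         if nodo_actual in finales:
--             rutas.append((ruta_actual[:], duracion_actual))
--             return
--
--         for sucesor in actividades[nodo_actual]['sucesores']:
--             buscar_rutas(sucesor, ruta_actual[:], duracion_actual)
--
--     rutas = []
--     for nodo_inicio in inicio: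
--         buscar_rutas(nodo_inicio, [], 0)
--
--     rutas_ordenadas = sorted(rutas, key=lambda x: x[1], reverse=True)
--     return rutas_ordenadas
-- ===== SOURCE B (Python) =====
-- def encontrar_rutas_cpm(datos):
--     """Encuentra todas las rutas posibles en una red CPM (recursion por valor, sin acumulador mutable)."""
--     dur = {}
--     preds = {}
--     for nombre, p, d in datos:
--         dur[nombre] = d
--         preds[nombre] = p.split(',') if p != '-' else []
--     succ = {n: [] for n in dur}
--     for n, ps in preds.items():
--         for q in ps:
--             if q != '-':
--                 succ[q].append(n)
--
--     def paths_from(n):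
--         if not succ[n]:
--             return [([n], dur[n])]
--         return [([n] + r, dur[n] + d) for s in succ[n] for (r, d) in paths_from(s)]
--
--     rutas = [rd for n in dur
--              if not preds[n] or preds[n] == ['-']
--              for rd in paths_from(n)]
--     return sorted(rutas, key=lambda x: x[1], reverse=True)
-- ===== Notes on version B (the rewrite author's own statement) =====
-- stated objective: simpler
-- what changed: A threads a mutable shared `rutas` list plus prefix path/duration through a side-effecting recursive DFS over one nested activity dict; B uses flat dicts (dur/preds/succ) and a pure value-returning recursion that builds each path suffix by suffix and combines with comprehensions.
import Mathlib
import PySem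

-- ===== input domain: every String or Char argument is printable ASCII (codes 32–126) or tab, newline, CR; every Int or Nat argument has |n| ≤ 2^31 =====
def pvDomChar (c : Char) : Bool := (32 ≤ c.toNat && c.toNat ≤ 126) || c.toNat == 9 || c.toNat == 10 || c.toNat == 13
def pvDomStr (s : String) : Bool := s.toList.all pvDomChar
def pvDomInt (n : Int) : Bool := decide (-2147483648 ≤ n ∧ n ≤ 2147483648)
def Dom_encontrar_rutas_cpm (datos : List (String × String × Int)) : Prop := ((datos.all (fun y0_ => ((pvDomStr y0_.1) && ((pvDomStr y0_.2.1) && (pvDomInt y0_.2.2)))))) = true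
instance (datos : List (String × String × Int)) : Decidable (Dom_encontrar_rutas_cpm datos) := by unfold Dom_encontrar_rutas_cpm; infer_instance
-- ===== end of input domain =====

-- B replaces A's shared-accumulator DFS (mutable `rutas`, prefix path/duration threaded down) over a
-- nested activity dict by a value-returning recursion over flat dicts: same output, objective 'simpler'.

-- ===== PORT A =====
-- `item[1].split(',') if item[1] != '-' else []` (appears verbatim in both Pythons); split? is some for sep=","
def pvParse (p : String) : List String :=
  if p ≠ "-" then (PySem.Str.split? p ",").getD [] else []

-- first loop of A: build the activity dict (predecesores, duracion, sucesores=[])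
def pvAct1 (datos : List (String × String × Int)) :
    PySem.Dict String (List String × Int × List String) :=
  datos.foldl (fun act item =>
    let nombre := item.1
    let predecesores := pvParse item.2.1
    let duracion := item.2.2
    act.insert nombre (predecesores, duracion, ([] : List String))) PySem.Dict.empty

-- second loop of A: for each activity, append its name to each predecessor's `sucesores`
def pvAct2 (datos : List (String × String × Int)) :
    PySem.Dict String (List String × Int × List String) :=
  (pvAct1 datos).items.foldl (fun act p =>
    p.2.1.foldl (fun act predecesor =>
      if predecesor ≠ "-" then
        act.modify predecesor ([], 0, []) (fun t => (t.1, t.2.1, t.2.2 ++ [p.1]))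
      else act) act) (pvAct1 datos)

def pvInicioA (datos : List (String × String × Int)) : List String :=
  ((pvAct2 datos).items.filter (fun p => decide (p.2.1 = []) || decide (p.2.1 = ["-"]))).map (·.1)

def pvFinalesA (datos : List (String × String × Int)) : List String :=
  ((pvAct2 datos).items.filter (fun p => decide (p.2.2.2 = ([] : List String)))).map (·.1)

-- A's `buscar_rutas`; the `rem`/`s ∈ rem` argument is ONLY a totality guard (on a cyclic input Python
-- recurses unboundedly, which Pre_ excludes); on inputs admitted by Pre_ the guard never fires.
def pvBuscarA (act : PySem.Dict String (List String × Int × List String)) (finales : List String)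
    (rem : List String) (nodo : String) (ruta : List String) (dur : Int)
    (rutas : List (List String × Int)) : List (List String × Int) :=
  let ruta := ruta ++ [nodo]
  let dur := dur + (act.getD nodo ([], 0, [])).2.1
  if nodo ∈ finales then rutas ++ [(ruta, dur)]
  else (act.getD nodo ([], 0, [])).2.2.foldl
    (fun rutas s => if h : s ∈ rem then pvBuscarA act finales (rem.erase s) s ruta dur rutas else rutas)
    rutas
termination_by rem.length
decreasing_by
  have h1 := List.length_erase_of_mem h
  have h2 := List.length_pos_of_mem h
  omega

def encontrar_rutas_cpm (datos : List (String × String × Int)) : List (List String × Int) :=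
  PySem.List.sorted
    ((pvInicioA datos).foldl
      (fun rutas nodo => pvBuscarA (pvAct2 datos) (pvFinalesA datos) (pvAct2 datos).keys nodo [] 0 rutas) [])
    (fun x => x.2) true

-- ===== PORT B =====
def pvDurD (datos : List (String × String × Int)) : PySem.Dict String Int :=
  datos.foldl (fun d it => d.insert it.1 it.2.2) PySem.Dict.empty

def pvPredsD (datos : List (String × String × Int)) : PySem.Dict String (List String) :=
  datos.foldl (fun d it => d.insert it.1 (pvParse it.2.1)) PySem.Dict.empty

-- `succ = {n: [] for n in dur}` then the append loop over preds.items()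
def pvSucc0D (datos : List (String × String × Int)) : PySem.Dict String (List String) :=
  (pvDurD datos).keys.foldl (fun d n => d.insert n ([] : List String)) PySem.Dict.empty

def pvSuccD (datos : List (String × String × Int)) : PySem.Dict String (List String) :=
  (pvPredsD datos).items.foldl (fun d p =>
    p.2.foldl (fun d q => if q ≠ "-" then d.modify q [] (fun l => l ++ [p.1]) else d) d)
    (pvSucc0D datos)

-- Source B's `paths_from`; `rem` again only a totality guard, never hit on inputs admitted by Pre_.
def pvPathsFrom (succ : PySem.Dict String (List String)) (dur : PySem.Dict String Int)
    (rem : List String) (n : String) : List (List String × Int) :=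
  if succ.getD n [] = [] then [([n], dur.getD n 0)]
  else (succ.getD n []).flatMap (fun s =>
    if h : s ∈ rem then
      (pvPathsFrom succ dur (rem.erase s) s).map (fun rd => (n :: rd.1, dur.getD n 0 + rd.2))
    else [])
termination_by rem.length
decreasing_by
  have h1 := List.length_erase_of_mem h
  have h2 := List.length_pos_of_mem h
  omega

def encontrar_rutas_cpm_alt (datos : List (String × String × Int)) : List (List String × Int) :=
  PySem.List.sorted
    (((pvDurD datos).keys.filter
      (fun n => decide ((pvPredsD datos).getD n [] = []) || decide ((pvPredsD datos).getD n [] = ["-"]))).flatMap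
      (fun n => pvPathsFrom (pvSuccD datos) (pvDurD datos) (pvDurD datos).keys n))
    (fun x => x.2) true

-- ===== PRECONDITION & SPEC =====
-- input views used by Pre_: the deduplicated key list, the LAST item stored under a name (dict
-- overwrite), its parsed predecessor list, the successor relation, and bounded reachability in it
def pvKeysPre (datos : List (String × String × Int)) : List String :=
  PySem.Set.ofList (datos.map (·.1))

def pvIt (datos : List (String × String × Int)) (x : String) : String × String × Int :=
  (datos.filter (fun it => it.1 == x)).getLastD (x, "-", 0)

def pvPredLast (datos : List (String × String × Int)) (x : String) : List String :=
  pvParse (pvIt datos x).2.1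

def pvSuccPre (datos : List (String × String × Int)) (x : String) : List String :=
  (pvKeysPre datos).filter (fun n => decide (x ∈ pvPredLast datos n) && decide (x ≠ "-"))

def pvReachPre (datos : List (String × String × Int)) : Nat → List String → List String
  | 0, S => S
  | n + 1, S => pvReachPre datos n (PySem.Set.update S (S.flatMap (pvSuccPre datos)))

def pvInicioPre (datos : List (String × String × Int)) : List String :=
  (pvKeysPre datos).filter
    (fun x => decide (pvPredLast datos x = []) || decide (pvPredLast datos x = ["-"]))

-- Pre_ admits exactly the inputs on which Python A returns: every non-'-' predecessor of a stored
-- activity must be an activity name (else A raises KeyError), and no node reachable from the start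
-- nodes may lie on a cycle (else A's recursion never terminates / raises RecursionError).
def Pre_encontrar_rutas_cpm (datos : List (String × String × Int)) : Prop :=
  (∀ x ∈ pvKeysPre datos, ∀ q ∈ pvPredLast datos x, q ≠ "-" → q ∈ datos.map (·.1)) ∧
  (∀ x ∈ pvReachPre datos (pvKeysPre datos).length (pvInicioPre datos),
    x ∉ pvReachPre datos (pvKeysPre datos).length (pvSuccPre datos x))
instance (datos : List (String × String × Int)) : Decidable (Pre_encontrar_rutas_cpm datos) := by
  unfold Pre_encontrar_rutas_cpm; infer_instance

def pvWitness_encontrar_rutas_cpm : (List (String × String × Int)) :=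
  [("A", "-", 2), ("B", "A", 3), ("C", "A,B", 1)]

def Spec_encontrar_rutas_cpm (datos : List (String × String × Int)) (out : List (List String × Int)) : Prop :=
  out = encontrar_rutas_cpm_alt datos
instance (datos : List (String × String × Int)) (out : List (List String × Int)) :
    Decidable (Spec_encontrar_rutas_cpm datos out) := by unfold Spec_encontrar_rutas_cpm; infer_instance

-- ===== CLAIM (what is proved, stated in full; the proofs are below) =====
def Claim_equal_encontrar_rutas_cpm : Prop :=
  ∀ (datos : List (String × String × Int)), Dom_encontrar_rutas_cpm datos →
    Pre_encontrar_rutas_cpm datos →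
    Spec_encontrar_rutas_cpm datos (encontrar_rutas_cpm datos)

-- ===== LEMMAS AND PROOFS =====

-- views used only by the proofs: the flat (predecessor, name) pair list both second passes fold over,
-- and the successor / start / sink lists both programs effectively compute
def pvL (datos : List (String × String × Int)) : List (String × String) :=
  (pvKeysPre datos).flatMap
    (fun x => ((pvPredLast datos x).filter (fun q => decide (q ≠ "-"))).map (fun q => (q, x)))

def pvSucc (datos : List (String × String × Int)) (x : String) : List String :=
  (((pvL datos).filter (fun p => p.1 == x)).map (·.2))

def pvFinales (datos : List (String × String × Int)) : List String :=
  (pvKeysPre datos).filter (fun x => decide (pvSucc datos x = []))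

-- generic folding lemmas
theorem pv_foldl_if {α β : Type} (p : α → Prop) [DecidablePred p] (f : β → α → β)
    (l : List α) (init : β) :
    l.foldl (fun b a => if p a then f b a else b) init
      = (l.filter (fun a => decide (p a))).foldl f init := by
  rw [List.foldl_filter]
  simp only [decide_eq_true_eq]

theorem pv_foldl_flatMap {α β γ : Type} (g : α → List β) (f : γ → β → γ) (l : List α) (init : γ) :
    (l.flatMap g).foldl f init = l.foldl (fun acc a => (g a).foldl f acc) init := by
  induction l generalizing init with
  | nil => rfl
  | cons a l ih => simp [List.flatMap_cons, List.foldl_append, ih]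

theorem pv_foldl_acc {α β : Type} (step : List β → α → List β) (g : α → List β) (l : List α)
    (hs : ∀ a ∈ l, ∀ acc, step acc a = acc ++ g a) :
    ∀ acc, l.foldl step acc = acc ++ l.flatMap g := by
  induction l with
  | nil => simp
  | cons a l ih =>
    intro acc
    rw [List.foldl_cons, ih (fun a ha => hs a (List.mem_cons_of_mem _ ha)),
      hs a (List.mem_cons_self) acc, List.flatMap_cons, List.append_assoc]

theorem pv_getLastD_map {α β : Type} (v : α → β) (l : List α) (a : α) :
    (l.map v).getLastD (v a) = v (l.getLastD a) := by
  induction l generalizing a with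
  | nil => rfl
  | cons b l ih => rw [List.map_cons, List.getLastD_cons, List.getLastD_cons, ih]

-- dict built by a fold of inserts keyed on the item name: keys, lookups, items
theorem pv_getD_insert_fold {ν : Type} (l : List (String × String × Int))
    (v : (String × String × Int) → ν) (d : PySem.Dict String ν) (x : String) (d0 : ν) :
    (l.foldl (fun d it => d.insert it.1 (v it)) d).getD x d0
      = ((l.filter (fun it => it.1 == x)).map v).getLastD (d.getD x d0) := by
  induction l generalizing d with
  | nil => rfl
  | cons it l ih =>
    rw [List.foldl_cons, ih]
    by_cases h : it.1 = x
    · subst h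
      rw [PySem.Dict.getD_insert_self, List.filter_cons, if_pos (by simp),
        List.map_cons, List.getLastD_cons]
    · rw [PySem.Dict.getD_insert_of_ne _ _ _ (Ne.symm h), List.filter_cons,
        if_neg (by simpa using h)]

theorem pv_getD_build {ν : Type} (datos : List (String × String × Int))
    (v : (String × String × Int) → ν) (x : String) (d0 : ν) (hd0 : v (x, "-", 0) = d0) :
    (datos.foldl (fun d it => d.insert it.1 (v it)) PySem.Dict.empty).getD x d0
      = v (pvIt datos x) := by
  rw [pv_getD_insert_fold, PySem.Dict.getD_empty, ← hd0, pv_getLastD_map]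
  rfl

theorem pv_keys_build {ν : Type} (datos : List (String × String × Int))
    (v : (String × String × Int) → ν) :
    (datos.foldl (fun d it => d.insert it.1 (v it)) PySem.Dict.empty).keys = pvKeysPre datos := by
  rw [PySem.Dict.keys_foldl_insert_key datos (·.1) (fun _ it => v it) PySem.Dict.empty]
  rw [show (PySem.Dict.empty : PySem.Dict String ν).keys = [] from rfl]
  exact PySem.Set.update_nil_left _

theorem pv_nodup_keys_build {ν : Type} (datos : List (String × String × Int))
    (v : (String × String × Int) → ν) :
    (datos.foldl (fun d it => d.insert it.1 (v it)) PySem.Dict.empty).keys.Nodup := by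
  exact PySem.Dict.nodup_keys_foldl_insert_key datos (·.1) (fun _ it => v it) PySem.Dict.empty
    PySem.Dict.nodup_keys_empty

theorem pv_nodup_keysPre (datos : List (String × String × Int)) : (pvKeysPre datos).Nodup :=
  PySem.Set.nodup_ofList _

theorem pv_items_build {ν : Type} (datos : List (String × String × Int))
    (v : (String × String × Int) → ν) (d0 : ν) (hd0 : ∀ y, v (y, "-", 0) = d0) :
    (datos.foldl (fun d it => d.insert it.1 (v it)) PySem.Dict.empty).items
      = (pvKeysPre datos).map (fun x => (x, v (pvIt datos x))) := by
  rw [PySem.Dict.items_eq_map_keys _ (pv_nodup_keys_build datos v) d0,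
    pv_keys_build datos v]
  apply List.map_congr_left
  intro x hx
  rw [pv_getD_build datos v x d0 (hd0 x)]

-- per-dict value views (hold for EVERY x, key or not)
theorem pv_act1_getD (datos : List (String × String × Int)) (x : String) :
    (pvAct1 datos).getD x ([], 0, [])
      = (pvPredLast datos x, (pvIt datos x).2.2, ([] : List String)) := by
  unfold pvAct1
  exact pv_getD_build datos (fun it => (pvParse it.2.1, it.2.2, ([] : List String))) x _ rfl

theorem pv_dur_getD (datos : List (String × String × Int)) (x : String) :
    (pvDurD datos).getD x 0 = (pvIt datos x).2.2 := by
  unfold pvDurD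
  exact pv_getD_build datos (fun it => it.2.2) x _ rfl

theorem pv_preds_getD (datos : List (String × String × Int)) (x : String) :
    (pvPredsD datos).getD x [] = pvPredLast datos x := by
  unfold pvPredsD
  exact pv_getD_build datos (fun it => pvParse it.2.1) x _ rfl

-- both second passes are one flat fold over the (predecessor, name) pair list pvL
theorem pv_act2_eq (datos : List (String × String × Int)) :
    pvAct2 datos = (pvL datos).foldl
      (fun d p => d.modify p.1 ([], 0, []) (fun t => (t.1, t.2.1, t.2.2 ++ [p.2]))) (pvAct1 datos) := by
  unfold pvAct2
  rw [show pvAct1 datos = datos.foldl (fun d it =>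
        d.insert it.1 (pvParse it.2.1, it.2.2, ([] : List String))) PySem.Dict.empty from rfl]
  rw [pv_items_build datos _ ([], 0, []) (fun y => rfl), List.foldl_map, pvL, pv_foldl_flatMap]
  congr 1
  funext acc x
  rw [pv_foldl_if (fun q => q ≠ "-"), List.foldl_map]
  rfl

theorem pv_succD_eq (datos : List (String × String × Int)) :
    pvSuccD datos = (pvL datos).foldl
      (fun d p => d.modify p.1 [] (fun l => l ++ [p.2])) (pvSucc0D datos) := by
  unfold pvSuccD pvPredsD
  rw [pv_items_build datos _ [] (fun y => rfl), List.foldl_map, pvL, pv_foldl_flatMap]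
  congr 1
  funext acc x
  rw [pv_foldl_if (fun q => q ≠ "-"), List.foldl_map]
  rfl

-- getD through a fold of component-modifies (A side's value type is a triple)
theorem pv_getD_modify3 (L : List (String × String))
    (d : PySem.Dict String (List String × Int × List String)) (x : String) :
    ((L.foldl (fun d p => d.modify p.1 ([], 0, [])
        (fun t => (t.1, t.2.1, t.2.2 ++ [p.2]))) d).getD x ([], 0, []))
      = ((d.getD x ([], 0, [])).1, (d.getD x ([], 0, [])).2.1,
          (d.getD x ([], 0, [])).2.2 ++ (L.filter (fun p => p.1 == x)).map (·.2)) := by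
  induction L generalizing d with
  | nil => simp
  | cons p L ih =>
    rw [List.foldl_cons, ih]
    by_cases hx : x = p.1
    · subst hx
      simp
    · rw [PySem.Dict.getD_modify]
      simp [hx, Ne.symm hx, beq_iff_eq]

-- membership facts about pvL under the precondition
theorem pv_mem_L {datos : List (String × String × Int)} {p : String × String}
    (hp : p ∈ pvL datos) :
    ∃ x ∈ pvKeysPre datos, p.1 ∈ pvPredLast datos x ∧ p.1 ≠ "-" ∧ p.2 = x := by
  rcases List.mem_flatMap.mp hp with ⟨x, hx, hmem⟩
  rcases List.mem_map.mp hmem with ⟨q, hq, hqp⟩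
  rcases List.mem_filter.mp hq with ⟨hq1, hq2⟩
  refine ⟨x, hx, ?_, ?_, ?_⟩
  · rw [← hqp]; exact hq1
  · rw [← hqp]; simpa using hq2
  · rw [← hqp]

theorem pv_resolve {datos : List (String × String × Int)}
    (hres : ∀ x ∈ pvKeysPre datos, ∀ q ∈ pvPredLast datos x, q ≠ "-" → q ∈ datos.map (·.1)) :
    ∀ p ∈ pvL datos, p.1 ∈ pvKeysPre datos := by
  intro p hp
  rcases pv_mem_L hp with ⟨x, hx, hq, hne, -⟩
  exact (PySem.Set.mem_ofList _ _).mpr (hres x hx p.1 hq hne)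

theorem pv_succ_mem {datos : List (String × String × Int)} {x s : String}
    (hs : s ∈ pvSucc datos x) : s ∈ pvKeysPre datos := by
  rcases List.mem_map.mp hs with ⟨p, hp, hps⟩
  rcases pv_mem_L (List.mem_filter.mp hp).1 with ⟨y, hy, -, -, h2⟩
  rw [← hps, h2]
  exact hy

-- keys survive the second pass (every touched predecessor already is a key)
theorem pv_update_self (s : PySem.Set String) (xs : List String) (h : ∀ x ∈ xs, x ∈ s) :
    PySem.Set.update s xs = s := by
  rw [PySem.Set.update_eq_append_filter]
  have : (PySem.Set.ofList xs).filter (fun y => !s.contains y) = [] := by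
    rw [List.filter_eq_nil_iff]
    intro a ha
    have ham : a ∈ s := h a ((PySem.Set.mem_ofList xs a).mp ha)
    simp [PySem.Set.contains, ham]
  rw [this, List.append_nil]

theorem pv_keys_act2 (datos : List (String × String × Int))
    (hres : ∀ x ∈ pvKeysPre datos, ∀ q ∈ pvPredLast datos x, q ≠ "-" → q ∈ datos.map (·.1)) :
    (pvAct2 datos).keys = pvKeysPre datos := by
  rw [pv_act2_eq datos,
    PySem.Dict.keys_foldl_modify_key (pvL datos) (fun p => p.1) ([], 0, [])
      (fun _ p => (fun t => (t.1, t.2.1, t.2.2 ++ [p.2]))) (pvAct1 datos)]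
  have hk : (pvAct1 datos).keys = pvKeysPre datos := pv_keys_build datos _
  rw [hk, pv_update_self]
  intro x hx
  rcases List.mem_map.mp hx with ⟨p, hp, rfl⟩
  exact pv_resolve hres p hp

-- value view of the A-side dict after the second pass
theorem pv_act2_getD (datos : List (String × String × Int)) (x : String) :
    (pvAct2 datos).getD x ([], 0, [])
      = (pvPredLast datos x, (pvIt datos x).2.2, pvSucc datos x) := by
  rw [pv_act2_eq datos, pv_getD_modify3, pv_act1_getD datos x]
  rfl

-- value view of the B-side dicts
theorem pv_succ0_getD (datos : List (String × String × Int)) (x : String) :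
    (pvSucc0D datos).getD x [] = [] := by
  unfold pvSucc0D pvDurD
  rw [pv_keys_build datos _]
  have hitems := PySem.Dict.items_foldl_insert_fresh (pvKeysPre datos) (fun n => n)
    (fun _ => ([] : List String)) PySem.Dict.empty
    (fun a _ => PySem.Dict.contains_empty _) (by simpa using pv_nodup_keysPre datos)
  by_cases hx : x ∈ pvKeysPre datos
  · apply PySem.Dict.getD_of_mem_items
    · rw [hitems]
      rw [show (PySem.Dict.empty : PySem.Dict String (List String)).items = [] from rfl,
        List.nil_append]
      exact List.mem_map_of_mem hx
    · simp only [PySem.Dict.keys, hitems]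
      rw [show (PySem.Dict.empty : PySem.Dict String (List String)).items = [] from rfl,
        List.nil_append, List.map_map]
      simpa [Function.comp_def] using pv_nodup_keysPre datos
  · apply PySem.Dict.getD_of_not_contains
    rw [← Bool.not_eq_true, PySem.Dict.contains_iff_mem_keys]
    simp only [PySem.Dict.keys, hitems]
    rw [show (PySem.Dict.empty : PySem.Dict String (List String)).items = [] from rfl,
      List.nil_append, List.map_map]
    simpa [Function.comp_def] using hx

theorem pv_succD_getD (datos : List (String × String × Int)) (x : String) :
    (pvSuccD datos).getD x [] = pvSucc datos x := by
  rw [pv_succD_eq datos, PySem.Dict.getD_foldl_modify_append, pv_succ0_getD datos,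
    List.nil_append]
  rfl

-- the hypotheses the DFS correspondence needs
theorem pv_hdur (datos : List (String × String × Int)) (x : String) :
    ((pvAct2 datos).getD x ([], 0, [])).2.1 = (pvDurD datos).getD x 0 := by
  rw [pv_act2_getD datos x, pv_dur_getD datos x]

theorem pv_hsucc (datos : List (String × String × Int)) (x : String) :
    ((pvAct2 datos).getD x ([], 0, [])).2.2 = (pvSuccD datos).getD x [] := by
  rw [pv_act2_getD datos x, pv_succD_getD datos x]

-- items of the A-side dict after the second pass, and the derived inicio/finales lists
theorem pv_act2_items (datos : List (String × String × Int))
    (hres : ∀ x ∈ pvKeysPre datos, ∀ q ∈ pvPredLast datos x, q ≠ "-" → q ∈ datos.map (·.1)) :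
    (pvAct2 datos).items = (pvKeysPre datos).map
      (fun x => (x, pvPredLast datos x, (pvIt datos x).2.2, pvSucc datos x)) := by
  have hndk : (pvAct2 datos).keys.Nodup := by
    rw [pv_keys_act2 datos hres]; exact pv_nodup_keysPre datos
  rw [PySem.Dict.items_eq_map_keys (pvAct2 datos) hndk ([], 0, []),
    pv_keys_act2 datos hres]
  apply List.map_congr_left
  intro x hx
  rw [pv_act2_getD datos x]

theorem pv_inicioA_eq (datos : List (String × String × Int))
    (hres : ∀ x ∈ pvKeysPre datos, ∀ q ∈ pvPredLast datos x, q ≠ "-" → q ∈ datos.map (·.1)) :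
    pvInicioA datos = pvInicioPre datos := by
  unfold pvInicioA pvInicioPre
  rw [pv_act2_items datos hres, List.filter_map, List.map_map]
  simp [Function.comp_def]

theorem pv_finalesA_eq (datos : List (String × String × Int))
    (hres : ∀ x ∈ pvKeysPre datos, ∀ q ∈ pvPredLast datos x, q ≠ "-" → q ∈ datos.map (·.1)) :
    pvFinalesA datos = pvFinales datos := by
  unfold pvFinalesA pvFinales
  rw [pv_act2_items datos hres, List.filter_map, List.map_map]
  simp [Function.comp_def]

theorem pv_hfin (datos : List (String × String × Int)) {x : String} (hx : x ∈ pvKeysPre datos) :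
    x ∈ pvFinales datos ↔ pvSucc datos x = [] := by
  unfold pvFinales
  rw [List.mem_filter]
  simp [hx]

-- the DFS correspondence: A's accumulator recursion against B's value recursion
theorem pv_dfs_eq (act : PySem.Dict String (List String × Int × List String))
    (finales : List String) (succ : PySem.Dict String (List String))
    (dur : PySem.Dict String Int) (names : List String)
    (hdur : ∀ x, (act.getD x ([], 0, [])).2.1 = dur.getD x 0)
    (hsucc : ∀ x, (act.getD x ([], 0, [])).2.2 = succ.getD x [])
    (hfin : ∀ x, x ∈ names → (x ∈ finales ↔ succ.getD x [] = []))
    (hcl : ∀ x s, s ∈ succ.getD x [] → s ∈ names) :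
    ∀ (k : Nat) (rem : List String), rem.length ≤ k → ∀ nodo, nodo ∈ names → ∀ ruta dur0 rutas,
      pvBuscarA act finales rem nodo ruta dur0 rutas
        = rutas ++ (pvPathsFrom succ dur rem nodo).map (fun rd => (ruta ++ rd.1, dur0 + rd.2)) := by
  intro k
  induction k with
  | zero =>
    intro rem hlen nodo hn ruta dur0 rutas
    have hrem : rem = [] := List.length_eq_zero_iff.mp (Nat.le_zero.mp hlen)
    subst hrem
    rw [pvBuscarA, pvPathsFrom]
    by_cases hS : succ.getD nodo [] = []
    · simp [hS, (hfin nodo hn).mpr hS, hdur]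
    · have hfinF : nodo ∉ finales := fun h => hS ((hfin nodo hn).mp h)
      simp only [hsucc, hdur, if_neg hfinF, if_neg hS]
      rw [List.map_flatMap]
      refine pv_foldl_acc _ _ _ ?_ rutas
      intro s hsmem acc
      simp
  | succ k ih =>
    intro rem hlen nodo hn ruta dur0 rutas
    rw [pvBuscarA, pvPathsFrom]
    by_cases hS : succ.getD nodo [] = []
    · simp [hS, (hfin nodo hn).mpr hS, hdur]
    · have hfinF : nodo ∉ finales := fun h => hS ((hfin nodo hn).mp h)
      simp only [hsucc, hdur, if_neg hfinF, if_neg hS]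
      rw [List.map_flatMap]
      refine pv_foldl_acc _ _ _ ?_ rutas
      intro s hsmem acc
      by_cases hs : s ∈ rem
      · rw [dif_pos hs, dif_pos hs,
          ih (rem.erase s)
            (by have h1 := List.length_erase_of_mem hs
                have h2 := List.length_pos_of_mem hs
                omega)
            s (hcl nodo s hsmem) _ _ acc]
        rw [List.map_map]
        congr 1
        apply List.map_congr_left
        intro rd _
        simp [add_assoc]
      · rw [dif_neg hs, dif_neg hs]
        simp

theorem main_eq (datos : List (String × String × Int))
    (hpre : Pre_encontrar_rutas_cpm datos) :
    encontrar_rutas_cpm datos = encontrar_rutas_cpm_alt datos := by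
  obtain ⟨hres, -⟩ := hpre
  unfold encontrar_rutas_cpm encontrar_rutas_cpm_alt
  congr 1
  have hkeys2 := pv_keys_act2 datos hres
  have hkdur : (pvDurD datos).keys = pvKeysPre datos := pv_keys_build datos _
  have hfin : ∀ x, x ∈ pvKeysPre datos →
      (x ∈ pvFinalesA datos ↔ (pvSuccD datos).getD x [] = []) := by
    intro x hx
    rw [pv_finalesA_eq datos hres, pv_succD_getD datos]
    exact pv_hfin datos hx
  have hcl : ∀ x s, s ∈ (pvSuccD datos).getD x [] → s ∈ pvKeysPre datos := by
    intro x s hsx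
    rw [pv_succD_getD datos] at hsx
    exact pv_succ_mem hsx
  have hdfs := pv_dfs_eq (pvAct2 datos) (pvFinalesA datos) (pvSuccD datos) (pvDurD datos)
    (pvKeysPre datos) (pv_hdur datos) (pv_hsucc datos) hfin hcl (pvKeysPre datos).length
  rw [pv_foldl_acc _
    (fun nodo => pvPathsFrom (pvSuccD datos) (pvDurD datos) (pvKeysPre datos) nodo)
    (pvInicioA datos) ?_ []]
  · rw [List.nil_append, hkdur]
    congr 1
    rw [pv_inicioA_eq datos hres]
    unfold pvInicioPre
    apply List.filter_congr
    intro x hx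
    rw [pv_preds_getD datos x]
  · intro nodo hmem acc
    have hnn : nodo ∈ pvKeysPre datos := by
      rw [pv_inicioA_eq datos hres] at hmem
      exact (List.mem_filter.mp hmem).1
    rw [hkeys2, hdfs (pvKeysPre datos) (Nat.le_refl _) nodo hnn [] 0 acc]
    simp

-- ===== VERDICT (by name: the statement is the Claim_ definition above) =====
theorem encontrar_rutas_cpm_spec : Claim_equal_encontrar_rutas_cpm := by
  intro datos _ hpre
  unfold Spec_encontrar_rutas_cpm
  exact main_eq datos hpre
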